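-- pv_equiv track=rewrite | github.com/Kinelan/Bayes | Lab 3/Lab3.py | structural_difference
-- ===== SOURCE A (Python) =====
-- def structural_difference(estimated_structure, reference_structure):
--     n = len(reference_structure)
--     difference = 0
--     extra_edges = 0
--     missing_edges = 0
--     reversed_edges = 0
--     for i in range(n):
--         parents_estimated = set(estimated_structure.get(i, []))
--         parents_reference = set(reference_structure.get(i, []))
--
--         # Зайві дуги
--         extra_edges += len(parents_estimated - parents_reference)
--
--         # Відсутні дуги
--         missing_edges += len(parents_reference - parents_estimated)
--
--         # Реверсовані дуги
--         for parent in parents_estimated.intersection(parents_reference):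
--             if parent not in reference_structure[i]:
--                 reversed_edges += 1
--
--         difference += len(parents_estimated - parents_reference) + len(parents_reference - parents_estimated)
--     return difference, extra_edges, missing_edges, reversed_edges
-- ===== SOURCE B (Python) =====
-- def structural_difference(estimated_structure, reference_structure):
--     n = len(reference_structure)
--
--     def sorted_edges(d):
--         out = []
--         for i in range(n):
--             for p in dict.fromkeys(d.get(i, [])):
--                 out.append((i, p))
--         out.sort()
--         return out
--
--     e = sorted_edges(estimated_structure)
--     r = sorted_edges(reference_structure)
--     extra = 0
--     missing = 0
--     a = 0
--     b = 0
--     while a < len(e) and b < len(r):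
--         if e[a] == r[b]:
--             a += 1
--             b += 1
--         elif e[a] < r[b]:
--             extra += 1
--             a += 1
--         else:
--             missing += 1
--             b += 1
--     extra += len(e) - a
--     missing += len(r) - b
--     return extra + missing, extra, missing, 0
-- ===== Notes on version B (the rewrite author's own statement) =====
-- stated objective: alternative
-- what changed: B replaces A's per-node hash-set differences (and its dead reversed-edge scan) by a sort-and-merge algorithm: it builds the two deduplicated (child, parent) edge lists, sorts each, and counts extra and missing edges in one two-pointer merge scan, returning the always-zero reversed count as the literal 0.
import Mathlib
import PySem

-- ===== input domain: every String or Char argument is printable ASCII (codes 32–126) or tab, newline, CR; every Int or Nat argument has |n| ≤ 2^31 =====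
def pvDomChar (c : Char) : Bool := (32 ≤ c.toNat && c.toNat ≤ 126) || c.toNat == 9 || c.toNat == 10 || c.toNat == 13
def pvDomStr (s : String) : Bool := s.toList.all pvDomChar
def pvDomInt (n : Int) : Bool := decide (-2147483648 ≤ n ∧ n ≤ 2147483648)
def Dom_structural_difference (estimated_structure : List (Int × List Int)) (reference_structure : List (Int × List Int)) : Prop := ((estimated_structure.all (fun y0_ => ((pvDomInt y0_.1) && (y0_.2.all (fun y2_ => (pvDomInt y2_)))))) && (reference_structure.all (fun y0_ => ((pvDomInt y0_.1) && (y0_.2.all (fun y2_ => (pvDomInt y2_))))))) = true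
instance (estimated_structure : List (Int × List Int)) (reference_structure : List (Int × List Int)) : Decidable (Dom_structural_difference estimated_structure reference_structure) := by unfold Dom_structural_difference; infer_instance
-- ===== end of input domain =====

-- B replaces A's per-node set differences (and its dead reversed-edge scan) by sort-and-merge:
-- both edge lists are sorted and a single two-pointer merge counts extra and missing edges
-- (objective: alternative; return value only, no side effects involved).

-- ===== PORT A =====
-- loop body of A's 'for i in range(n)'; state = (difference, extra_edges, missing_edges, reversed_edges)
def pvStepA (eD rD : PySem.Dict Int (List Int)) (st : Int × Int × Int × Int) (i : Int) : Int × Int × Int × Int :=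
  let parents_estimated : PySem.Set Int := PySem.Set.ofList (eD.getD i [])
  let parents_reference : PySem.Set Int := PySem.Set.ofList (rD.getD i [])
  let extra_edges := st.2.1 + PySem.Set.len (PySem.Set.diff parents_estimated parents_reference)
  let missing_edges := st.2.2.1 + PySem.Set.len (PySem.Set.diff parents_reference parents_estimated)
  -- 'reference_structure[i]' executes only when the intersection is non-empty, i.e. the key i is
  -- present; getD is exact there (never reached with its default)
  let reversed_edges := (PySem.Set.inter parents_estimated parents_reference).foldl
      (fun r parent => if !((rD.getD i []).contains parent) then r + 1 else r) st.2.2.2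
  let difference := st.1 + PySem.Set.len (PySem.Set.diff parents_estimated parents_reference)
      + PySem.Set.len (PySem.Set.diff parents_reference parents_estimated)
  (difference, extra_edges, missing_edges, reversed_edges)

def structural_difference (estimated_structure : List (Int × List Int)) (reference_structure : List (Int × List Int)) : Int × Int × Int × Int :=
  let eD : PySem.Dict Int (List Int) := PySem.Dict.mk estimated_structure
  let rD : PySem.Dict Int (List Int) := PySem.Dict.mk reference_structure
  let n : Int := (PySem.Dict.size rD : Int)
  (PySem.List.pyRange 0 n 1).foldl (pvStepA eD rD) (0, 0, 0, 0)

-- ===== PORT B =====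
-- Python's tuple comparison 'e[a] < r[b]' on pairs: lexicographic order (this is exactly the
-- 'before' test PySem.List.sorted2 uses for the tuple key (fst, snd))
def pvLexLt (a b : Int × Int) : Bool :=
  decide (a.1 < b.1) || (!decide (b.1 < a.1) && decide (a.2 < b.2))

-- B's 'sorted_edges': for i in range(n): for p in dict.fromkeys(d.get(i, [])): out.append((i, p)); out.sort()
def pvEdges (d : PySem.Dict Int (List Int)) (n : Int) : List (Int × Int) :=
  (PySem.List.pyRange 0 n 1).foldl
    (fun out i => (PySem.List.dedup (d.getD i [])).foldl (fun out p => out ++ [(i, p)]) out) []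

-- B's merge loop; the while loop over indices a, b becomes recursion on the two suffixes
-- e[a:], r[b:]; the post-loop 'extra += len(e) - a' / 'missing += len(r) - b' are the base cases
def pvMerge : List (Int × Int) → List (Int × Int) → Int → Int → Int × Int
  | [], r, extra, missing => (extra, missing + (r.length : Int))
  | x :: e, [], extra, missing => (extra + (((x :: e).length : Nat) : Int), missing)
  | x :: e, y :: r, extra, missing =>
    if x = y then pvMerge e r extra missing
    else if pvLexLt x y then pvMerge e (y :: r) (extra + 1) missing
    else pvMerge (x :: e) r extra (missing + 1)
termination_by e r _ _ => e.length + r.length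
decreasing_by all_goals (simp_all; try omega)

def structural_difference_alt (estimated_structure : List (Int × List Int)) (reference_structure : List (Int × List Int)) : Int × Int × Int × Int :=
  let eD : PySem.Dict Int (List Int) := PySem.Dict.mk estimated_structure
  let rD : PySem.Dict Int (List Int) := PySem.Dict.mk reference_structure
  let n : Int := (PySem.Dict.size rD : Int)
  let e := PySem.List.sorted2 (pvEdges eD n) Prod.fst Prod.snd
  let r := PySem.List.sorted2 (pvEdges rD n) Prod.fst Prod.snd
  let m := pvMerge e r 0 0
  (m.1 + m.2, m.1, m.2, 0)

-- ===== PRECONDITION & SPEC =====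
def Spec_structural_difference (estimated_structure : List (Int × List Int)) (reference_structure : List (Int × List Int)) (out : Int × Int × Int × Int) : Prop := out = structural_difference_alt estimated_structure reference_structure
instance (estimated_structure : List (Int × List Int)) (reference_structure : List (Int × List Int)) (out : Int × Int × Int × Int) : Decidable (Spec_structural_difference estimated_structure reference_structure out) := by unfold Spec_structural_difference; infer_instance

-- ===== CLAIM (what is proved, stated in full; the proofs are below) =====
def Claim_equal_structural_difference : Prop := ∀ (estimated_structure : List (Int × List Int)) (reference_structure : List (Int × List Int)), Dom_structural_difference estimated_structure reference_structure → Spec_structural_difference estimated_structure reference_structure (structural_difference estimated_structure reference_structure)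

-- ===== LEMMAS AND PROOFS =====

-- per-node extra/missing counts, as Nat
def pvCnt (d1 d2 : PySem.Dict Int (List Int)) (i : Int) : Nat :=
  (PySem.Set.diff (PySem.Set.ofList (d1.getD i [])) (PySem.Set.ofList (d2.getD i []))).length

-- ---- A side (A's loop is a sum of per-node counts; its reversed-edge loop never fires) ----

theorem pvCountNone (c : Int → Bool) (l : List Int) (r : Int) (h : ∀ x ∈ l, c x = true) :
    l.foldl (fun r x => if !(c x) then r + 1 else r) r = r := by
  induction l generalizing r with
  | nil => rfl
  | cons a l ih =>
    simp only [List.foldl_cons, h a (by simp)]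
    exact ih r (fun x hx => h x (by simp [hx]))

theorem pvStepA_eq (eD rD : PySem.Dict Int (List Int)) (st : Int × Int × Int × Int) (i : Int) :
    pvStepA eD rD st i =
      (st.1 + (pvCnt eD rD i : Int) + (pvCnt rD eD i : Int),
       st.2.1 + (pvCnt eD rD i : Int), st.2.2.1 + (pvCnt rD eD i : Int), st.2.2.2) := by
  unfold pvStepA pvCnt
  simp only [PySem.Set.len]
  congr 3
  apply pvCountNone
  intro x hx
  unfold PySem.Set.inter at hx
  rw [List.mem_filter] at hx
  have hx2 : x ∈ rD.getD i [] := by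
    have := hx.2
    simp only [PySem.Set.contains_eq_listContains, List.contains_iff_mem] at this
    exact (PySem.Set.mem_ofList _ _).mp this
  simpa [List.contains_iff_mem] using hx2

theorem pvFoldA (eD rD : PySem.Dict Int (List Int)) (l : List Int) (d e m r : Int) :
    l.foldl (pvStepA eD rD) (d, e, m, r) =
      (d + ((l.map (fun i => (pvCnt eD rD i : Int) + (pvCnt rD eD i : Int))).sum),
       e + ((l.map (fun i => (pvCnt eD rD i : Int))).sum),
       m + ((l.map (fun i => (pvCnt rD eD i : Int))).sum), r) := by
  induction l generalizing d e m r with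
  | nil => simp
  | cons a l ih =>
    simp only [List.foldl_cons, pvStepA_eq, List.map_cons, List.sum_cons]
    rw [ih]
    refine Prod.ext (by ring) (Prod.ext (by ring) (Prod.ext (by ring) rfl))

-- ---- the lexicographic order pvLexLt is a strict linear order ----

theorem pvLexLt_irrefl (a : Int × Int) : pvLexLt a a = false := by
  simp [pvLexLt]

theorem pvLexLt_asymm {a b : Int × Int} (h : pvLexLt a b = true) : pvLexLt b a = false := by
  rcases a with ⟨a1, a2⟩; rcases b with ⟨b1, b2⟩
  simp [pvLexLt] at *; omega

theorem pvLexLt_trans {a b c : Int × Int} (h1 : pvLexLt a b = true) (h2 : pvLexLt b c = true) :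
    pvLexLt a c = true := by
  rcases a with ⟨a1, a2⟩; rcases b with ⟨b1, b2⟩; rcases c with ⟨c1, c2⟩
  simp [pvLexLt] at *; omega

theorem pvLexLt_total {a b : Int × Int} (h : pvLexLt b a = false) (hne : a ≠ b) :
    pvLexLt a b = true := by
  rcases a with ⟨a1, a2⟩; rcases b with ⟨b1, b2⟩
  simp [pvLexLt, Prod.mk.injEq] at *; omega

-- ---- sorted2 (insertion sort with the lexicographic 'before') yields a strictly sorted list ----

theorem pvInsertBy_nil (x : Int × Int) : PySem.List.insertBy pvLexLt x [] = [x] := rfl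

theorem pvInsertBy_cons (x y : Int × Int) (ys : List (Int × Int)) :
    PySem.List.insertBy pvLexLt x (y :: ys) =
      if pvLexLt x y then x :: y :: ys else y :: PySem.List.insertBy pvLexLt x ys := rfl

theorem pvInsertBy_pairwise (x : Int × Int) (acc : List (Int × Int))
    (h : acc.Pairwise (fun a b => pvLexLt b a = false)) :
    (PySem.List.insertBy pvLexLt x acc).Pairwise (fun a b => pvLexLt b a = false) := by
  induction acc with
  | nil => simp [pvInsertBy_nil]
  | cons y ys ih =>
    rw [List.pairwise_cons] at h
    rw [pvInsertBy_cons]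
    split_ifs with hxy
    · refine List.Pairwise.cons ?_ (List.Pairwise.cons h.1 h.2)
      intro z hz
      rcases List.mem_cons.mp hz with rfl | hz
      · exact pvLexLt_asymm hxy
      · by_contra hc
        have hzx : pvLexLt z x = true := by
          cases hq : pvLexLt z x
          · exact absurd hq hc
          · rfl
        have := pvLexLt_trans hzx hxy
        rw [h.1 z hz] at this
        exact absurd this (by simp)
    · refine List.Pairwise.cons ?_ (ih h.2)
      intro z hz
      rw [PySem.List.mem_insertBy] at hz
      rcases hz with rfl | hz
      · exact Bool.eq_false_iff.mpr hxy
      · exact h.1 z hz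

theorem pvFoldInsert_pairwise (xs acc : List (Int × Int))
    (h : acc.Pairwise (fun a b => pvLexLt b a = false)) :
    (xs.foldl (fun acc x => PySem.List.insertBy pvLexLt x acc) acc).Pairwise
      (fun a b => pvLexLt b a = false) := by
  induction xs generalizing acc with
  | nil => exact h
  | cons x xs ih => exact ih _ (pvInsertBy_pairwise x acc h)

theorem pvSorted2_eq (xs : List (Int × Int)) :
    PySem.List.sorted2 xs Prod.fst Prod.snd =
      xs.foldl (fun acc x => PySem.List.insertBy pvLexLt x acc) [] := rfl

theorem pvSorted2_pairwise_lt (xs : List (Int × Int)) (hnd : xs.Nodup) :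
    (PySem.List.sorted2 xs Prod.fst Prod.snd).Pairwise (fun a b => pvLexLt a b = true) := by
  have h1 : (PySem.List.sorted2 xs Prod.fst Prod.snd).Pairwise (fun a b => pvLexLt b a = false) := by
    rw [pvSorted2_eq]; exact pvFoldInsert_pairwise xs [] (by simp)
  have h2 : (PySem.List.sorted2 xs Prod.fst Prod.snd).Nodup :=
    ((PySem.List.sorted2_perm xs Prod.fst Prod.snd false).nodup_iff).mpr hnd
  exact (h1.and h2).imp (fun hab => pvLexLt_total hab.1 hab.2)

-- ---- the merge loop counts the two one-sided differences of strictly sorted lists ----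

theorem pvContains_eq_of_iff {l1 l2 : List (Int × Int)} {z : Int × Int}
    (h : z ∈ l1 ↔ z ∈ l2) : l1.contains z = l2.contains z := by
  rw [Bool.eq_iff_iff, List.contains_iff_mem, List.contains_iff_mem]
  exact h

theorem pvMerge_spec (e r : List (Int × Int)) (extra missing : Int)
    (hE : e.Pairwise (fun a b => pvLexLt a b = true))
    (hR : r.Pairwise (fun a b => pvLexLt a b = true)) :
    pvMerge e r extra missing =
      (extra + (((e.filter (fun z => !(r.contains z))).length : Nat) : Int),
       missing + (((r.filter (fun z => !(e.contains z))).length : Nat) : Int)) := by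
  revert hE hR
  fun_induction pvMerge e r extra missing with
  | case1 r extra missing =>
    intro _ _
    simp
  | case2 x e extra missing =>
    intro _ _
    simp
  | case3 e x r extra missing ih =>
    intro hE hR
    rw [List.pairwise_cons] at hE hR
    rw [ih hE.2 hR.2]
    have hcx1 : ((x :: r).contains x) = true := List.contains_iff_mem.mpr List.mem_cons_self
    have hcx2 : ((x :: e).contains x) = true := List.contains_iff_mem.mpr List.mem_cons_self
    have he1 : (x :: e).filter (fun z => !((x :: r).contains z)) = e.filter (fun z => !(r.contains z)) := by
      rw [List.filter_cons, hcx1, if_neg (by simp)]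
      apply List.filter_congr
      intro z hz
      have hzx : z ≠ x := fun hq => by
        have := hE.1 z hz; rw [hq, pvLexLt_irrefl] at this; exact absurd this (by simp)
      congr 1
      exact pvContains_eq_of_iff (by simp [hzx])
    have he2 : (x :: r).filter (fun z => !((x :: e).contains z)) = r.filter (fun z => !(e.contains z)) := by
      rw [List.filter_cons, hcx2, if_neg (by simp)]
      apply List.filter_congr
      intro z hz
      have hzx : z ≠ x := fun hq => by
        have := hR.1 z hz; rw [hq, pvLexLt_irrefl] at this; exact absurd this (by simp)
      congr 1
      exact pvContains_eq_of_iff (by simp [hzx])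
    rw [he1, he2]
  | case4 x e y r extra missing hxy hlt ih =>
    intro hE hR
    rw [List.pairwise_cons] at hE
    rw [ih hE.2 hR]
    have hxmem : x ∉ (y :: r) := by
      intro hq
      rcases List.mem_cons.mp hq with rfl | hq
      · exact hxy rfl
      · rw [List.pairwise_cons] at hR
        have := pvLexLt_trans hlt (hR.1 x hq)
        rw [pvLexLt_irrefl] at this
        exact absurd this (by simp)
    have hcx : ((y :: r).contains x) = false := by
      cases hq : (y :: r).contains x
      · rfl
      · exact absurd (List.contains_iff_mem.mp hq) hxmem
    have he1 : (x :: e).filter (fun z => !((y :: r).contains z)) =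
        x :: e.filter (fun z => !((y :: r).contains z)) := by
      rw [List.filter_cons, hcx, if_pos (by simp)]
    have he2 : (y :: r).filter (fun z => !((x :: e).contains z)) =
        (y :: r).filter (fun z => !(e.contains z)) := by
      apply List.filter_congr
      intro z hz
      have hzx : z ≠ x := fun hq => hxmem (hq ▸ hz)
      congr 1
      exact pvContains_eq_of_iff (by simp [hzx])
    rw [he1, he2]
    refine Prod.ext ?_ (by simp)
    simp only [List.length_cons, Nat.cast_add, Nat.cast_one]
    ring
  | case5 x e y r extra missing hxy hlt ih =>
    intro hE hR
    rw [List.pairwise_cons] at hR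
    have hylt : pvLexLt y x = true :=
      pvLexLt_total (by simpa using hlt) (fun hq => hxy hq.symm)
    rw [ih hE hR.2]
    have hymem : y ∉ (x :: e) := by
      intro hq
      rcases List.mem_cons.mp hq with rfl | hq
      · exact hxy rfl
      · rw [List.pairwise_cons] at hE
        have := pvLexLt_trans hylt (hE.1 y hq)
        rw [pvLexLt_irrefl] at this
        exact absurd this (by simp)
    have hcy : ((x :: e).contains y) = false := by
      cases hq : (x :: e).contains y
      · rfl
      · exact absurd (List.contains_iff_mem.mp hq) hymem
    have he1 : (y :: r).filter (fun z => !((x :: e).contains z)) =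
        y :: r.filter (fun z => !((x :: e).contains z)) := by
      rw [List.filter_cons, hcy, if_pos (by simp)]
    have he2 : (x :: e).filter (fun z => !((y :: r).contains z)) =
        (x :: e).filter (fun z => !(r.contains z)) := by
      apply List.filter_congr
      intro z hz
      have hzy : z ≠ y := fun hq => hymem (hq ▸ hz)
      congr 1
      exact pvContains_eq_of_iff (by simp [hzy])
    rw [he1, he2]
    refine Prod.ext (by simp) ?_
    simp only [List.length_cons, Nat.cast_add, Nat.cast_one]
    ring

-- ---- the edge list is the concatenation of per-node blocks ----

theorem pvEdges_eq (d : PySem.Dict Int (List Int)) (n : Int) :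
    pvEdges d n = (PySem.List.pyRange 0 n 1).flatMap
      (fun i => (PySem.Set.ofList (d.getD i [])).map (fun p => (i, p))) := by
  unfold pvEdges
  simp only [PySem.List.foldl_append_singleton_eq_map, PySem.List.dedup_eq_ofList]
  rw [PySem.List.foldl_append_eq_flatMap]
  rfl

theorem pvMem_edges (d : PySem.Dict Int (List Int)) (n : Int) (z : Int × Int) :
    z ∈ pvEdges d n ↔ (0 ≤ z.1 ∧ z.1 < n ∧ z.2 ∈ d.getD z.1 []) := by
  rw [pvEdges_eq, List.mem_flatMap]
  constructor
  · rintro ⟨i, hi, hz⟩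
    rcases List.mem_map.mp hz with ⟨p, hp, rfl⟩
    rw [PySem.List.mem_pyRange_one] at hi
    exact ⟨hi.1, hi.2, (PySem.Set.mem_ofList _ _).mp hp⟩
  · rintro ⟨h1, h2, h3⟩
    refine ⟨z.1, PySem.List.mem_pyRange_one.mpr ⟨h1, h2⟩, ?_⟩
    exact List.mem_map.mpr ⟨z.2, (PySem.Set.mem_ofList _ _).mpr h3, rfl⟩

theorem pvNodup_edges (d : PySem.Dict Int (List Int)) (n : Int) : (pvEdges d n).Nodup := by
  rw [pvEdges_eq, List.nodup_flatMap]
  constructor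
  · intro i _
    exact (PySem.Set.nodup_ofList _).map (fun p q h => by simpa using congrArg Prod.snd h)
  · refine (PySem.List.pairwise_lt_pyRange_one 0 n).imp ?_
    intro i j hij z hzi hzj
    rcases List.mem_map.mp hzi with ⟨p, _, rfl⟩
    rcases List.mem_map.mp hzj with ⟨q, _, hq⟩
    have : j = i := by simpa using congrArg Prod.fst hq
    omega

-- ---- the flat filter length is the sum of the per-node counts ----

theorem pvFilterLen (d1 d2 : PySem.Dict Int (List Int)) (n : Int) :
    ((pvEdges d1 n).filter (fun z => !((pvEdges d2 n).contains z))).length =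
      ((PySem.List.pyRange 0 n 1).map (pvCnt d1 d2)).sum := by
  rw [pvEdges_eq d1, List.filter_flatMap, List.length_flatMap]
  refine congrArg List.sum (List.map_congr_left ?_)
  intro i hi
  rw [PySem.List.mem_pyRange_one] at hi
  rw [List.filter_map, List.length_map]
  unfold pvCnt
  simp only [PySem.Set.diff]
  congr 1
  apply List.filter_congr
  intro p _
  simp only [Function.comp, PySem.Set.contains_eq_listContains]
  congr 1
  rw [Bool.eq_iff_iff, List.contains_iff_mem, List.contains_iff_mem, pvMem_edges,
    PySem.Set.mem_ofList]
  simp [hi.1, hi.2]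

-- Nat-valued sums cast to the Int-valued sums
theorem pvSumCast (l : List Int) (c : Int → Nat) :
    (l.map (fun i => ((c i : Nat) : Int))).sum = ((l.map c).sum : Nat) := by
  induction l with
  | nil => rfl
  | cons a l ih => simp [ih]

theorem pvSumCastAdd (l : List Int) (c1 c2 : Int → Nat) :
    (l.map (fun i => ((c1 i : Nat) : Int) + ((c2 i : Nat) : Int))).sum =
      (((l.map c1).sum : Nat) : Int) + (((l.map c2).sum : Nat) : Int) := by
  induction l with
  | nil => simp
  | cons a l ih => simp [ih]; ring

-- ===== VERDICT (by name: the statement is the Claim_ definition above) =====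
theorem structural_difference_spec : Claim_equal_structural_difference := by
  intro est ref _
  unfold Spec_structural_difference structural_difference structural_difference_alt
  dsimp only
  rw [pvFoldA]
  have hE := pvSorted2_pairwise_lt _
    (pvNodup_edges (PySem.Dict.mk est) ((PySem.Dict.size (PySem.Dict.mk ref) : Nat) : Int))
  have hR := pvSorted2_pairwise_lt _
    (pvNodup_edges (PySem.Dict.mk ref) ((PySem.Dict.size (PySem.Dict.mk ref) : Nat) : Int))
  rw [pvMerge_spec _ _ 0 0 hE hR]
  have hfun : ∀ (A B : List (Int × Int)),
      ((PySem.List.sorted2 A Prod.fst Prod.snd).filter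
        (fun z => !((PySem.List.sorted2 B Prod.fst Prod.snd).contains z))).length =
      (A.filter (fun z => !(B.contains z))).length := by
    intro A B
    have hpred : (fun z => !((PySem.List.sorted2 B Prod.fst Prod.snd).contains z)) =
        (fun z => !(B.contains z)) := by
      funext z
      congr 1
      exact pvContains_eq_of_iff ((PySem.List.sorted2_perm B Prod.fst Prod.snd false).mem_iff)
    rw [hpred]
    exact ((PySem.List.sorted2_perm A Prod.fst Prod.snd false).filter _).length_eq
  rw [hfun, hfun, pvFilterLen, pvFilterLen, pvSumCastAdd, pvSumCast, pvSumCast]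
  simp
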